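-- pv_equiv track=rewrite | github.com/2020PB/police-brutality | tools/data_builder.py | find_md_link_or_url
-- ===== SOURCE A (Python) =====
-- def find_md_link_or_url(text):
--     """
--     find_md_link_or_url('ab[cd](ef)xy') returns:
--         ('abcdxy', 'ef')
--
--     All the text goes into the text, and the URL as well.
--     """
--     start = (0,)
--     open_sq = (1,)
--     closed_sq = (2,)
--     open_curve = (3,)
--     closed_curve = (4,)
--     state = start
--     text_content = ""
--     link_url = ""
--     for ch in text:
--         if state == start:
--             if ch == "[":
--                 state = open_sq
--             else:
--                 text_content += ch
--         elif state == open_sq: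
--             if ch == "]":
--                 state = closed_sq
--             else:
--                 text_content += ch
--         elif state == closed_sq:
--             if ch == "(":
--                 state = open_curve
--             else:
--                 text_content += ch
--         elif state == open_curve:
--             if ch == ")":
--                 state = closed_curve
--             else:
--                 link_url += ch
--         elif state == closed_curve:
--             text_content += ch
--
--     if len(link_url) == 0:
--         # no markdown link found, consider it all one url
--         link_url = text_content
--         text_content = ""
--
--     return text_content.strip(), link_url.strip()
-- ===== SOURCE B (Python) =====
-- def find_md_link_or_url(text):
--     """
--     find_md_link_or_url('ab[cd](ef)xy') returns:
--         ('abcdxy', 'ef')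
--     """
--     text_content, sep, rest = text.partition("[")
--     link_url = ""
--     if sep:
--         inner, sep, rest = rest.partition("]")
--         text_content += inner
--         if sep:
--             mid, sep, rest = rest.partition("(")
--             text_content += mid
--             if sep:
--                 link_url, sep, tail = rest.partition(")")
--                 if sep:
--                     text_content += tail
--
--     if not link_url:
--         link_url, text_content = text_content, ""
--
--     return text_content.strip(), link_url.strip()
-- ===== Notes on version B (the rewrite author's own statement) =====
-- stated objective: simpler
-- what changed: A's five-state character-by-character FSM with two accumulator strings is replaced by at most four str.partition splits on the bracket delimiters, concatenating the slices; same final swap and strip.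
import Mathlib
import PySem

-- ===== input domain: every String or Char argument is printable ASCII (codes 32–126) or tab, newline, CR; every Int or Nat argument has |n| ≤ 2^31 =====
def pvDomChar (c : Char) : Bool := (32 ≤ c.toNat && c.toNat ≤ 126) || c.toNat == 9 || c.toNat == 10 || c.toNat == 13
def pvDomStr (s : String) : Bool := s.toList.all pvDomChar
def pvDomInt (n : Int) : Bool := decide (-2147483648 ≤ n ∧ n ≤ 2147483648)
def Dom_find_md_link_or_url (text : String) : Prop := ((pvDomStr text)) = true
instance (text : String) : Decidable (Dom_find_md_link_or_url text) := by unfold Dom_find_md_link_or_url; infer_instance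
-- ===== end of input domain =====

-- B replaces A's five-state character FSM by three/four str.partition delimiter splits (simpler decomposition; same return value).

-- ===== PORT A =====
-- A's state tuple (0,)…(4,) is ported as Nat 0…4; the fold state is (state, text_content, link_url).
def pvStepA (acc : Nat × List Char × List Char) (ch : Char) : Nat × List Char × List Char :=
  let (state, tc, lu) := acc
  if state = 0 then (if ch = '[' then (1, tc, lu) else (0, tc ++ [ch], lu))
  else if state = 1 then (if ch = ']' then (2, tc, lu) else (1, tc ++ [ch], lu))
  else if state = 2 then (if ch = '(' then (3, tc, lu) else (2, tc ++ [ch], lu))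
  else if state = 3 then (if ch = ')' then (4, tc, lu) else (3, tc, lu ++ [ch]))
  else if state = 4 then (4, tc ++ [ch], lu)
  else acc

def find_md_link_or_url (text : String) : String × String :=
  let r := text.toList.foldl pvStepA (0, ([] : List Char), ([] : List Char))
  let tc := r.2.1
  let lu := r.2.2
  let (tc, lu) := if lu.length = 0 then (([] : List Char), tc) else (tc, lu)
  (String.ofList (PySem.Chars.strip tc), String.ofList (PySem.Chars.strip lu))

-- ===== PORT B =====
-- hand port of Python's s.partition(c) for a ONE-CHARACTER separator c (exact there):
-- (part before the first c, whether c occurs, part after it); when c is absent the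
-- first component is all of s, which equals takeWhile (· ≠ c) s in that case.
def pvPartition (cs : List Char) (c : Char) : List Char × Bool × List Char :=
  match cs.dropWhile (· ≠ c) with
  | [] => (cs.takeWhile (· ≠ c), false, [])
  | _ :: after => (cs.takeWhile (· ≠ c), true, after)

def find_md_link_or_url_alt (text : String) : String × String :=
  let (tc₀, sep₁, rest₁) := pvPartition text.toList '['
  let (tc, lu) :=
    if sep₁ then
      let (inner, sep₂, rest₂) := pvPartition rest₁ ']'
      let tc₁ := tc₀ ++ inner
      if sep₂ then
        let (mid, sep₃, rest₃) := pvPartition rest₂ '('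
        let tc₂ := tc₁ ++ mid
        if sep₃ then
          let (lu, sep₄, tail) := pvPartition rest₃ ')'
          if sep₄ then (tc₂ ++ tail, lu) else (tc₂, lu)
        else (tc₂, [])
      else (tc₁, [])
    else (tc₀, [])
  let (tc, lu) := if lu = [] then (([] : List Char), tc) else (tc, lu)
  (String.ofList (PySem.Chars.strip tc), String.ofList (PySem.Chars.strip lu))

-- ===== PRECONDITION & SPEC =====
def Spec_find_md_link_or_url (text : String) (out : String × String) : Prop := out = find_md_link_or_url_alt text
instance (text : String) (out : String × String) : Decidable (Spec_find_md_link_or_url text out) := by unfold Spec_find_md_link_or_url; infer_instance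

-- ===== CLAIM (what is proved, stated in full; the proofs are below) =====
def Claim_equal_find_md_link_or_url : Prop := ∀ (text : String), Dom_find_md_link_or_url text → Spec_find_md_link_or_url text (find_md_link_or_url text)

-- ===== LEMMAS AND PROOFS =====

-- the FSM from state 4 copies the rest into text_content
theorem pvFsm4 (cs tc lu : List Char) :
    cs.foldl pvStepA (4, tc, lu) = (4, tc ++ cs, lu) := by
  induction cs generalizing tc with
  | nil => simp
  | cons c cs ih => simp [pvStepA, ih]

-- the FSM from state 3 collects link chars until ')'
theorem pvFsm3 (cs tc lu : List Char) :
    cs.foldl pvStepA (3, tc, lu) =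
      match cs.dropWhile (· ≠ ')') with
      | [] => (3, tc, lu ++ cs.takeWhile (· ≠ ')'))
      | _ :: after => (4, tc ++ after, lu ++ cs.takeWhile (· ≠ ')')) := by
  induction cs generalizing lu with
  | nil => simp
  | cons c cs ih =>
    by_cases h : c = ')'
    · simp [h, pvStepA, List.dropWhile, List.takeWhile, pvFsm4]
    · simp [h, pvStepA, List.dropWhile, List.takeWhile, ih]

-- the FSM from state 2 collects text chars until '('
theorem pvFsm2 (cs tc lu : List Char) :
    cs.foldl pvStepA (2, tc, lu) =
      match cs.dropWhile (· ≠ '(') with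
      | [] => (2, tc ++ cs.takeWhile (· ≠ '('), lu)
      | _ :: after =>
          after.foldl pvStepA (3, tc ++ cs.takeWhile (· ≠ '('), lu) := by
  induction cs generalizing tc with
  | nil => simp
  | cons c cs ih =>
    by_cases h : c = '('
    · simp [h, pvStepA, List.dropWhile, List.takeWhile]
    · simp [h, pvStepA, List.dropWhile, List.takeWhile, ih]

-- the FSM from state 1 collects text chars until ']'
theorem pvFsm1 (cs tc lu : List Char) :
    cs.foldl pvStepA (1, tc, lu) =
      match cs.dropWhile (· ≠ ']') with
      | [] => (1, tc ++ cs.takeWhile (· ≠ ']'), lu)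
      | _ :: after =>
          after.foldl pvStepA (2, tc ++ cs.takeWhile (· ≠ ']'), lu) := by
  induction cs generalizing tc with
  | nil => simp
  | cons c cs ih =>
    by_cases h : c = ']'
    · simp [h, pvStepA, List.dropWhile, List.takeWhile]
    · simp [h, pvStepA, List.dropWhile, List.takeWhile, ih]

-- the FSM from state 0 collects text chars until '['
theorem pvFsm0 (cs tc lu : List Char) :
    cs.foldl pvStepA (0, tc, lu) =
      match cs.dropWhile (· ≠ '[') with
      | [] => (0, tc ++ cs.takeWhile (· ≠ '['), lu)
      | _ :: after =>
          after.foldl pvStepA (1, tc ++ cs.takeWhile (· ≠ '['), lu) := by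
  induction cs generalizing tc with
  | nil => simp
  | cons c cs ih =>
    by_cases h : c = '['
    · simp [h, pvStepA, List.dropWhile, List.takeWhile]
    · simp [h, pvStepA, List.dropWhile, List.takeWhile, ih]

-- ===== VERDICT (by name: the statement is the Claim_ definition above) =====
theorem find_md_link_or_url_spec : Claim_equal_find_md_link_or_url := by
  intro text _
  unfold Spec_find_md_link_or_url find_md_link_or_url find_md_link_or_url_alt pvPartition
  set cs := text.toList with hcs
  simp only [pvFsm0]
  cases h0 : cs.dropWhile (· ≠ '[') with
  | nil => simp
  | cons _ r1 =>
    dsimp only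
    simp only [pvFsm1]
    cases h1 : r1.dropWhile (· ≠ ']') with
    | nil => simp
    | cons _ r2 =>
      dsimp only
      simp only [pvFsm2]
      cases h2 : r2.dropWhile (· ≠ '(') with
      | nil => simp
      | cons _ r3 =>
        dsimp only
        simp only [pvFsm3]
        cases h3 : r3.dropWhile (· ≠ ')') with
        | nil => simp
        | cons _ r4 => simp
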